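-- pv_equiv track=rewrite | github.com/devDivyank/Foundations-Of-Algorithms | HW3/income.py | partitionSum
-- ===== SOURCE A (Python) =====
-- def partitionSum(values, pivot):
--     """
--         returns the partitions 'lesser', 'equals', 'greater' and also the sums of 'lesser' and 'greater' sums
--
--         :param values: a list of values
--         :param pivot: value at the pivot index
--     """
--     L = []
--     G = []
--     E = []
--     LSum = 0
--     ESum = 0
--     for i in values:                                            # --> Complexity: O(n)
--         if i == pivot:
--             ESum+=i
--             E.append(i)
--         elif i > pivot:
--             G.append(i)
--         else:
--             LSum += i
--             L.append(i)
--     return (L, G, E, LSum, ESum)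
-- ===== SOURCE B (Python) =====
-- def partitionSum(values, pivot):
--     L = [i for i in values if i < pivot]
--     G = [i for i in values if i > pivot]
--     E = [i for i in values if i == pivot]
--     return (L, G, E, sum(L), sum(E))
-- ===== Notes on version B (the rewrite author's own statement) =====
-- stated objective: simpler
-- what changed: Replaces the single branched accumulating loop with three independent filter comprehensions and two sum reductions over the already-built lists.
import Mathlib
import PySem

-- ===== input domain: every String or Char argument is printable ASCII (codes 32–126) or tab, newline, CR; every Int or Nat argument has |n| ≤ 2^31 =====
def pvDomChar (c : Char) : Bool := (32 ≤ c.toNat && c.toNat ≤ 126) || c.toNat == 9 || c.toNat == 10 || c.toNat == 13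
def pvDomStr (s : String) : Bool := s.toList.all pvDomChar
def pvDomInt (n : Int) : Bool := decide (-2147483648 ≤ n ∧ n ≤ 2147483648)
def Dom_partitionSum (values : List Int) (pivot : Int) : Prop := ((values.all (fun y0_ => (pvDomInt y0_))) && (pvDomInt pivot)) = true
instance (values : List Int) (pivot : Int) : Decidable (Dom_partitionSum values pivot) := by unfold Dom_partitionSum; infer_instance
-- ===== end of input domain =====

-- B replaces A's single branched accumulating loop with three filters and two sums (objective: simpler).


-- ===== PORT A =====
-- A's loop: one pass keeping (L, G, E, LSum, ESum), branch order i == pivot / i > pivot / else.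
def partitionSumStep (pivot : Int) (st : List Int × List Int × List Int × Int × Int) (i : Int) :
    List Int × List Int × List Int × Int × Int :=
  let (L, G, E, LSum, ESum) := st
  if i == pivot then (L, G, E ++ [i], LSum, ESum + i)
  else if i > pivot then (L, G ++ [i], E, LSum, ESum)
  else (L ++ [i], G, E, LSum + i, ESum)

def partitionSum (values : List Int) (pivot : Int) : List Int × List Int × List Int × Int × Int :=
  values.foldl (partitionSumStep pivot) ([], [], [], 0, 0)

-- ===== PORT B =====
def partitionSum_alt (values : List Int) (pivot : Int) : List Int × List Int × List Int × Int × Int :=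
  let L := values.filter (fun i => i < pivot)
  let G := values.filter (fun i => i > pivot)
  let E := values.filter (fun i => i == pivot)
  (L, G, E, L.sum, E.sum)

-- ===== PRECONDITION & SPEC =====
def Spec_partitionSum (values : List Int) (pivot : Int) (out : List Int × List Int × List Int × Int × Int) : Prop := out = partitionSum_alt values pivot
instance (values : List Int) (pivot : Int) (out : List Int × List Int × List Int × Int × Int) : Decidable (Spec_partitionSum values pivot out) := by unfold Spec_partitionSum; infer_instance

-- ===== CLAIM (what is proved, stated in full; the proofs are below) =====
def Claim_equal_partitionSum : Prop := ∀ (values : List Int) (pivot : Int), Dom_partitionSum values pivot → Spec_partitionSum values pivot (partitionSum values pivot)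

-- ===== LEMMAS AND PROOFS =====
theorem partitionSum_foldl_inv (pivot : Int) (values L G E : List Int) (LSum ESum : Int) :
    values.foldl (partitionSumStep pivot) (L, G, E, LSum, ESum) =
      (L ++ values.filter (fun i => i < pivot),
       G ++ values.filter (fun i => i > pivot),
       E ++ values.filter (fun i => i == pivot),
       LSum + (values.filter (fun i => i < pivot)).sum,
       ESum + (values.filter (fun i => i == pivot)).sum) := by
  induction values generalizing L G E LSum ESum with
  | nil => simp
  | cons x xs ih =>
    simp only [List.foldl_cons, partitionSumStep, List.filter_cons]
    by_cases hx : x = pivot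
    · simp [hx, ih, add_assoc]
    · by_cases hgt : x > pivot
      · have : ¬ (x < pivot) := by omega
        simp [hx, hgt, this, ih]
      · have hlt : x < pivot := by omega
        simp [hx, hgt, hlt, ih, add_comm, add_assoc, add_left_comm]

-- ===== VERDICT (by name: the statement is the Claim_ definition above) =====
theorem partitionSum_spec : Claim_equal_partitionSum := by
  intro values pivot _
  unfold Spec_partitionSum partitionSum partitionSum_alt
  simp [partitionSum_foldl_inv]
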